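-- pv_equiv track=rewrite | github.com/lukashavrlant/bletchley-park | cryptanalysis/vigenere_brute_force.py | _choose_key
-- ===== SOURCE A (Python) =====
-- def _choose_key(keys):
-- 	values = set()
-- 	filtered_keys = {}
-- 	for k, v in sorted(keys.items(), key=lambda x: len(x[0])):
-- 		if v not in values:
-- 			values.add(v)
-- 			filtered_keys[k] = v
-- 	return sorted(filtered_keys.items(), key=lambda x: x[1], reverse=True)[0][0]
-- ===== SOURCE B (Python) =====
-- def _choose_key(keys):
-- 	best = max(keys.values())
-- 	return min((k for k, v in keys.items() if v == best), key=len)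
-- ===== Notes on version B (the rewrite author's own statement) =====
-- stated objective: alternative
-- what changed: A length-sorts all items, dedups by value into a dict, then value-sorts the dict and takes the head; B never sorts: one pass computes the maximum value, a second pass takes the first shortest key among those holding that maximum (min with key=len).
-- outside the precondition, e.g. on _choose_key({}): A raises IndexError, B raises ValueError
import Mathlib
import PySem

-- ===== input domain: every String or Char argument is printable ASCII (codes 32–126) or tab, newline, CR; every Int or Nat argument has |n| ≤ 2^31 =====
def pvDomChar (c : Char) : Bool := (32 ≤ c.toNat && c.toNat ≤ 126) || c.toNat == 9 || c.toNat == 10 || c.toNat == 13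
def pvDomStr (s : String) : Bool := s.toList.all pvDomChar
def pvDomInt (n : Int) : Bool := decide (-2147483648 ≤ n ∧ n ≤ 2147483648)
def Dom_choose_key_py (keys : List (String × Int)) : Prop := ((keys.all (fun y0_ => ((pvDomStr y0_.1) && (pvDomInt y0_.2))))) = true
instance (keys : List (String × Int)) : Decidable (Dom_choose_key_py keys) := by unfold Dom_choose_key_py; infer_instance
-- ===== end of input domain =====

-- B replaces A's sort–dedup–sort pipeline by a scalar max over the values followed by a
-- first-minimum-wins length scan over the keys holding that max (objective: alternative decomposition).


-- ===== PORT A =====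
def choose_key_py (keys : List (String × Int)) : String :=
  -- values = set(); filtered_keys = {}
  -- for k, v in sorted(keys.items(), key=lambda x: len(x[0])): if v not in values: add / insert
  let ls := PySem.List.sorted keys (fun x => PySem.Str.len x.1)
  let st := ls.foldl
    (fun (st : PySem.Set Int × PySem.Dict String Int) p =>
      if PySem.Set.contains st.1 p.2 then st
      else (PySem.Set.add st.1 p.2, st.2.insert p.1 p.2))
    (PySem.Set.empty, PySem.Dict.empty)
  -- sorted(filtered_keys.items(), key=lambda x: x[1], reverse=True)[0][0]
  match PySem.List.pyGet? (PySem.List.sorted st.2.items (fun x => x.2) true) 0 with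
  | some p => p.1
  | none => ""   -- Python raises IndexError here (empty dict); excluded by Pre_

-- ===== PORT B =====
def choose_key_py_alt (keys : List (String × Int)) : String :=
  match PySem.List.max? (keys.map Prod.snd) (fun v => v) with
  | none => ""   -- max() of an empty sequence raises ValueError; excluded by Pre_
  | some best =>
    match PySem.List.min? (keys.filter (fun p => p.2 == best)) (fun p => PySem.Str.len p.1) with
    | some p => p.1
    | none => ""   -- unreachable: some key carries the value best

-- ===== PRECONDITION & SPEC =====
-- Pre_ excludes the empty dict, on which A raises IndexError (and B's max raises ValueError), and
-- association lists with duplicate keys, which do not represent a Python dict (dict keys are distinct).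
def Pre_choose_key_py (keys : List (String × Int)) : Prop :=
  keys ≠ [] ∧ (keys.map Prod.fst).Nodup
instance (keys : List (String × Int)) : Decidable (Pre_choose_key_py keys) := by unfold Pre_choose_key_py; infer_instance

def pvWitness_choose_key_py : (List (String × Int)) := [("ab", 3), ("c", 5), ("d", 5)]

def Spec_choose_key_py (keys : List (String × Int)) (out : String) : Prop := out = choose_key_py_alt keys
instance (keys : List (String × Int)) (out : String) : Decidable (Spec_choose_key_py keys out) := by unfold Spec_choose_key_py; infer_instance

-- ===== CLAIM (what is proved, stated in full; the proofs are below) =====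
def Claim_equal_choose_key_py : Prop := ∀ (keys : List (String × Int)), Dom_choose_key_py keys → Pre_choose_key_py keys → Spec_choose_key_py keys (choose_key_py keys)

-- ===== LEMMAS AND PROOFS =====

-- ---- stability of PySem.List.sorted: filter commutes with the sort, head of the sort is min? ----

theorem pv_insertBy_all_before {α : Type} (before : α → α → Bool) (x : α) (l : List α)
    (h : ∀ a ∈ l, before x a = true) :
    PySem.List.insertBy before x l = x :: l := by
  cases l with
  | nil => simp [PySem.List.insertBy]
  | cons a l => simp [PySem.List.insertBy, h a (by simp)]

theorem pv_insertBy_pairwise {α κ : Type} [LinearOrder κ] (key : α → κ) (x : α) :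
    ∀ (acc : List α), acc.Pairwise (fun a b => key a ≤ key b) →
    (PySem.List.insertBy (fun a b => decide (key a < key b)) x acc).Pairwise (fun a b => key a ≤ key b) := by
  intro acc
  induction acc with
  | nil => intro _; simp [PySem.List.insertBy]
  | cons y ys ih =>
    intro hp
    rw [List.pairwise_cons] at hp
    by_cases hxy : key x < key y
    · simp only [PySem.List.insertBy, hxy, decide_true, if_true]
      refine List.Pairwise.cons ?_ (List.Pairwise.cons hp.1 hp.2)
      intro b hb
      rcases List.mem_cons.mp hb with rfl | hb
      · exact le_of_lt hxy
      · exact le_trans (le_of_lt hxy) (hp.1 b hb)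
    · simp only [PySem.List.insertBy, hxy, decide_false]
      refine List.Pairwise.cons ?_ (ih hp.2)
      intro b hb
      rcases (PySem.List.mem_insertBy _ _ _ _).mp hb with rfl | hb
      · exact le_of_not_gt hxy
      · exact hp.1 b hb

theorem pv_filter_insertBy {α κ : Type} [LinearOrder κ] (key : α → κ) (P : α → Bool) (x : α) :
    ∀ (acc : List α), acc.Pairwise (fun a b => key a ≤ key b) →
    (PySem.List.insertBy (fun a b => decide (key a < key b)) x acc).filter P =
      (if P x then PySem.List.insertBy (fun a b => decide (key a < key b)) x (acc.filter P)
       else acc.filter P) := by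
  intro acc
  induction acc with
  | nil => intro _; by_cases hx : P x <;> simp [PySem.List.insertBy, hx]
  | cons y ys ih =>
    intro hp
    rw [List.pairwise_cons] at hp
    by_cases hxy : key x < key y
    · simp only [PySem.List.insertBy, hxy, decide_true, if_true]
      by_cases hx : P x
      · rw [pv_insertBy_all_before]
        · simp [hx]
        · intro a ha
          rw [List.mem_filter] at ha
          rcases List.mem_cons.mp ha.1 with rfl | hmem
          · simpa using hxy
          · simpa using lt_of_lt_of_le hxy (hp.1 a hmem)
      · simp [hx]
    · by_cases hy : P y <;> by_cases hx : P x <;>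
        simp [PySem.List.insertBy, hxy, List.filter_cons, hy, hx, ih hp.2]

theorem pv_foldl_filter {α κ : Type} [LinearOrder κ] (key : α → κ) (P : α → Bool) :
    ∀ (xs acc : List α), acc.Pairwise (fun a b => key a ≤ key b) →
    (xs.foldl (fun acc x => PySem.List.insertBy (fun a b => decide (key a < key b)) x acc) acc).filter P =
      (xs.filter P).foldl (fun acc x => PySem.List.insertBy (fun a b => decide (key a < key b)) x acc) (acc.filter P) := by
  intro xs
  induction xs with
  | nil => intro acc _; simp
  | cons x t ih =>
    intro acc hp
    simp only [List.foldl_cons, List.filter_cons]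
    rw [ih _ (pv_insertBy_pairwise key x acc hp), pv_filter_insertBy key P x acc hp]
    by_cases hx : P x <;> simp [hx]

theorem pv_sorted_filter {α κ : Type} [LinearOrder κ] (key : α → κ) (P : α → Bool) (xs : List α) :
    PySem.List.sorted (xs.filter P) key = (PySem.List.sorted xs key).filter P := by
  rw [PySem.List.sorted_eq_foldl_insertBy, PySem.List.sorted_eq_foldl_insertBy,
    pv_foldl_filter key P xs [] (by simp)]
  simp

theorem pv_head_insertBy {α κ : Type} [LinearOrder κ] (key : α → κ) (x : α) (acc : List α) :
    (PySem.List.insertBy (fun a b => decide (key a < key b)) x acc).head? =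
      (match acc.head? with
       | none => some x
       | some m => if key x < key m then some x else some m) := by
  cases acc with
  | nil => simp [PySem.List.insertBy]
  | cons y ys => by_cases h : key x < key y <;> simp [PySem.List.insertBy, h]

theorem pv_foldl_head {α κ : Type} [LinearOrder κ] (key : α → κ) :
    ∀ (xs acc : List α),
    (xs.foldl (fun acc x => PySem.List.insertBy (fun a b => decide (key a < key b)) x acc) acc).head? =
      xs.foldl (fun m x =>
        match m with
        | none => some x
        | some m => if key x < key m then some x else some m) acc.head? := by
  intro xs
  induction xs with
  | nil => intro acc; simp
  | cons x t ih =>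
    intro acc
    simp only [List.foldl_cons]
    rw [ih, pv_head_insertBy]

theorem pv_head_sorted_min {α κ : Type} [LinearOrder κ] (key : α → κ) (xs : List α) :
    (PySem.List.sorted xs key).head? = PySem.List.min? xs key := by
  rw [PySem.List.sorted_eq_foldl_insertBy, pv_foldl_head key xs []]
  rfl

-- ---- the A-side dedup loop, as a plain foldl over item lists ----

def pvStep (st : PySem.Set Int × PySem.Dict String Int) (p : String × Int) :
    PySem.Set Int × PySem.Dict String Int :=
  if PySem.Set.contains st.1 p.2 then st
  else (PySem.Set.add st.1 p.2, st.2.insert p.1 p.2)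

def pvStepL (acc : List (String × Int)) (p : String × Int) : List (String × Int) :=
  if (acc.map Prod.snd).contains p.2 then acc else acc ++ [p]

def pvG (l : List (String × Int)) : List (String × Int) := l.foldl pvStepL []
theorem pv_fold_items_aux :
    ∀ (l : List (String × Int)) (s : PySem.Set Int) (d : PySem.Dict String Int),
    (∀ v : Int, PySem.Set.contains s v = (d.items.map Prod.snd).contains v) →
    (∀ p ∈ l, d.contains p.1 = false) →
    (l.map Prod.fst).Nodup →
    (l.foldl pvStep (s, d)).2.items = l.foldl pvStepL d.items := by
  intro l
  induction l with
  | nil => intro s d _ _ _; simp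
  | cons p t ih =>
    intro s d hsv hf hnd
    simp only [List.foldl_cons]
    by_cases hc : PySem.Set.contains s p.2 = true
    · have hc' : (d.items.map Prod.snd).contains p.2 = true := by rw [← hsv]; exact hc
      have e1 : pvStep (s, d) p = (s, d) := by unfold pvStep; rw [if_pos hc]
      have e2 : pvStepL d.items p = d.items := by unfold pvStepL; rw [if_pos hc']
      rw [e1, e2]
      exact ih s d hsv (fun q hq => hf q (List.mem_cons_of_mem _ hq)) (by
        simpa using hnd.of_cons)
    · have hc' : ¬ ((d.items.map Prod.snd).contains p.2 = true) := by rw [← hsv]; exact hc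
      have hdp : d.contains p.1 = false := hf p (by simp)
      have hins : (d.insert p.1 p.2).items = d.items ++ [p] := by
        unfold PySem.Dict.insert
        rw [if_neg (by simp [hdp])]
      have hadd : PySem.Set.add s p.2 = s ++ [p.2] := by
        unfold PySem.Set.add; rw [if_neg hc]
      have e1 : pvStep (s, d) p = (PySem.Set.add s p.2, d.insert p.1 p.2) := by
        unfold pvStep; rw [if_neg hc]
      have e2 : pvStepL d.items p = d.items ++ [p] := by
        unfold pvStepL; rw [if_neg hc']
      rw [e1, e2]
      have := ih (PySem.Set.add s p.2) (d.insert p.1 p.2) ?_ ?_ ?_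
      · rw [this, hins]
      · intro v
        rw [hins, hadd]
        simp only [PySem.Set.contains] at hsv ⊢
        simp only [List.map_append, List.map_cons, List.map_nil]
        simp only [List.contains_append, hsv v]
      · intro q hq
        unfold PySem.Dict.contains
        rw [hins]
        have hne : (p.1 == q.1) = false := by
          simp only [List.map_cons, List.nodup_cons] at hnd
          have hq1 : q.1 ∈ t.map Prod.fst := List.mem_map_of_mem hq
          simp only [beq_eq_false_iff_ne]
          intro h; exact hnd.1 (h ▸ hq1)
        have hfq : d.contains q.1 = false := hf q (List.mem_cons_of_mem _ hq)
        unfold PySem.Dict.contains at hfq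
        simp [List.any_append, hfq, hne]
      · simpa using hnd.of_cons
theorem pv_foldl_mem_aux :
    ∀ (l acc : List (String × Int)) (q : String × Int),
    q ∈ l.foldl pvStepL acc → q ∈ acc ∨ q ∈ l := by
  intro l
  induction l with
  | nil => intro acc q h; simpa using h
  | cons p t ih =>
    intro acc q h
    simp only [List.foldl_cons] at h
    rcases ih _ q h with hq | hq
    · unfold pvStepL at hq
      split at hq
      · exact Or.inl hq
      · rcases List.mem_append.mp hq with hq | hq
        · exact Or.inl hq
        · simp at hq; subst hq; exact Or.inr (by simp)
    · exact Or.inr (List.mem_cons_of_mem _ hq)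

theorem pv_pvG_mem (l : List (String × Int)) {q : String × Int} (hq : q ∈ pvG l) : q ∈ l := by
  rcases pv_foldl_mem_aux l [] q hq with h | h
  · simp at h
  · exact h

theorem pv_foldl_snd_aux :
    ∀ (l acc : List (String × Int)) (v : Int),
    v ∈ (l.foldl pvStepL acc).map Prod.snd ↔ v ∈ acc.map Prod.snd ∨ v ∈ l.map Prod.snd := by
  intro l
  induction l with
  | nil => intro acc v; simp
  | cons p t ih =>
    intro acc v
    simp only [List.foldl_cons, ih, List.map_cons, List.mem_cons]
    unfold pvStepL
    by_cases hc : (acc.map Prod.snd).contains p.2 = true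
    · rw [if_pos hc]
      have hpm : p.2 ∈ acc.map Prod.snd := by simpa using hc
      constructor
      · rintro (h | h)
        · exact Or.inl h
        · exact Or.inr (Or.inr h)
      · rintro (h | h | h)
        · exact Or.inl h
        · exact Or.inl (h ▸ hpm)
        · exact Or.inr h
    · rw [if_neg hc]
      simp only [List.map_append, List.map_cons, List.map_nil, List.mem_append,
        List.mem_singleton, List.mem_cons]
      tauto

theorem pv_foldl_first_aux :
    ∀ (l acc : List (String × Int)) (q : String × Int),
    q ∈ l.foldl pvStepL acc →
    q ∈ acc ∨ (l.find? (fun p => p.2 == q.2) = some q ∧ q.2 ∉ acc.map Prod.snd) := by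
  intro l
  induction l with
  | nil => intro acc q h; simpa using h
  | cons p t ih =>
    intro acc q h
    simp only [List.foldl_cons] at h
    by_cases hc : (acc.map Prod.snd).contains p.2 = true
    · have e : pvStepL acc p = acc := by unfold pvStepL; rw [if_pos hc]
      rw [e] at h
      rcases ih _ q h with hq | ⟨hfind, hnm⟩
      · exact Or.inl hq
      · refine Or.inr ⟨?_, hnm⟩
        have hne : (p.2 == q.2) = false := by
          simp only [beq_eq_false_iff_ne]
          intro he
          exact hnm (he ▸ (by simpa using hc))
        simp [hne, hfind]
    · have e : pvStepL acc p = acc ++ [p] := by unfold pvStepL; rw [if_neg hc]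
      rw [e] at h
      rcases ih _ q h with hq | ⟨hfind, hnm⟩
      · rcases List.mem_append.mp hq with hq | hq
        · exact Or.inl hq
        · simp only [List.mem_singleton] at hq
          subst hq
          refine Or.inr ⟨by simp, by simpa using hc⟩
      · simp only [List.map_append, List.map_cons, List.map_nil, List.mem_append,
          List.mem_singleton] at hnm
        push_neg at hnm
        refine Or.inr ⟨?_, hnm.1⟩
        have hne : (p.2 == q.2) = false := by
          simp only [beq_eq_false_iff_ne]
          exact fun he => hnm.2 he.symm
        simp [hne, hfind]

theorem pv_foldl_ne_nil_aux :
    ∀ (l acc : List (String × Int)), acc ≠ [] → l.foldl pvStepL acc ≠ [] := by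
  intro l
  induction l with
  | nil => intro acc h; exact h
  | cons p t ih =>
    intro acc h
    simp only [List.foldl_cons]
    refine ih _ ?_
    unfold pvStepL
    split
    · exact h
    · simp

theorem pv_pvG_first (l : List (String × Int)) {q : String × Int} (hq : q ∈ pvG l) :
    l.find? (fun p => p.2 == q.2) = some q := by
  rcases pv_foldl_first_aux l [] q hq with h | h
  · simp at h
  · exact h.1

theorem pv_pvG_snd_mem (l : List (String × Int)) {v : Int} (hv : v ∈ l.map Prod.snd) :
    v ∈ (pvG l).map Prod.snd := by
  exact (pv_foldl_snd_aux l [] v).mpr (Or.inr hv)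

theorem pv_pvG_ne_nil (l : List (String × Int)) (h : l ≠ []) : pvG l ≠ [] := by
  cases l with
  | nil => exact absurd rfl h
  | cons p t =>
    unfold pvG
    simp only [List.foldl_cons]
    refine pv_foldl_ne_nil_aux t (pvStepL [] p) ?_
    unfold pvStepL
    simp

-- ===== VERDICT (by name: the statement is the Claim_ definition above) =====
theorem choose_key_py_spec : Claim_equal_choose_key_py := by
  intro keys _hdom hpre
  obtain ⟨hne, hnd⟩ := hpre
  unfold Spec_choose_key_py choose_key_py choose_key_py_alt
  simp only []
  set ls := PySem.List.sorted keys (fun x => PySem.Str.len x.1) with hls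
  -- the dedup loop's dictionary, as a list
  have hstep : (fun (st : PySem.Set Int × PySem.Dict String Int) p =>
      if PySem.Set.contains st.1 p.2 then st
      else (PySem.Set.add st.1 p.2, st.2.insert p.1 p.2)) = pvStep := rfl
  have hlsnd : (ls.map Prod.fst).Nodup := by
    have hperm : ls.Perm keys := PySem.List.sorted_perm keys _ false
    exact (hperm.map Prod.fst).nodup_iff.mpr hnd
  have hitems : (ls.foldl pvStep (PySem.Set.empty, PySem.Dict.empty)).2.items = pvG ls := by
    refine pv_fold_items_aux ls PySem.Set.empty PySem.Dict.empty ?_ ?_ hlsnd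
    · intro v; rfl
    · intro p _; rfl
  rw [hstep, hitems]
  -- A's head of the reverse value sort
  have hlsne : ls ≠ [] := by
    intro h
    exact hne ((PySem.List.sorted_eq_nil_iff keys _ false).mp h)
  have hIne : pvG ls ≠ [] := pv_pvG_ne_nil ls hlsne
  obtain ⟨h, tl, hrev⟩ : ∃ h tl, PySem.List.sorted (pvG ls) (fun x => x.2) true = h :: tl := by
    rcases e : PySem.List.sorted (pvG ls) (fun x => x.2) true with _ | ⟨h, tl⟩
    · exact absurd ((PySem.List.sorted_eq_nil_iff _ _ true).mp e) hIne
    · exact ⟨h, tl, rfl⟩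
  rw [hrev]
  have hget : PySem.List.pyGet? (h :: tl) 0 = some h := by
    simp [PySem.List.pyGet?, PySem.List.pyIdx?]
  rw [hget]
  -- h is an item; every item's value is ≤ h's
  have hhI : h ∈ pvG ls := by
    have : h ∈ PySem.List.sorted (pvG ls) (fun x => x.2) true := by rw [hrev]; simp
    exact (PySem.List.mem_sorted _ _ _ _).mp this
  have hmaxI : ∀ y ∈ pvG ls, y.2 ≤ h.2 :=
    PySem.List.key_head_sorted_rev_ge (pvG ls) (fun x => x.2) hrev
  -- B's best value
  rcases hmax : PySem.List.max? (keys.map Prod.snd) (fun v => v) with _ | best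
  · exact absurd ((PySem.List.max?_eq_none_iff _ _).mp hmax) (by simpa using hne)
  have hbestmem : best ∈ keys.map Prod.snd := PySem.List.max?_mem hmax
  have hbestmax : ∀ v ∈ keys.map Prod.snd, v ≤ best := fun v hv => PySem.List.max?_isMax hmax v hv
  -- h.2 = best
  have hhkeys : h ∈ keys := (PySem.List.mem_sorted _ _ _ _).mp (pv_pvG_mem ls hhI)
  have h2best : h.2 = best := by
    refine le_antisymm (hbestmax h.2 (List.mem_map_of_mem hhkeys)) ?_
    have : best ∈ ls.map Prod.snd := by
      rcases List.mem_map.mp hbestmem with ⟨q, hq, rfl⟩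
      exact List.mem_map_of_mem ((PySem.List.mem_sorted _ _ _ _).mpr hq)
    rcases List.mem_map.mp (pv_pvG_snd_mem ls this) with ⟨r, hr, hr2⟩
    exact hr2 ▸ hmaxI r hr
  -- h is the first element of ls with value best, i.e. Python's min(…, key=len)
  have hfind : ls.find? (fun p => p.2 == best) = some h := by
    have := pv_pvG_first ls hhI
    rwa [h2best] at this
  have hminB : PySem.List.min? (keys.filter (fun p => p.2 == best)) (fun p => PySem.Str.len p.1) = some h := by
    rw [← pv_head_sorted_min, pv_sorted_filter, ← hls, List.head?_filter, hfind]
  simp only [hminB]
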